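-- pv_equiv track=rewrite | github.com/Raptor200111/AdventOfCode2025 | Day9/day9.py | getVerticalWalls
-- ===== SOURCE A (Python) =====
-- def getVerticalWalls(points):
--     verticals = []
--
--     for i in range(len(points)):
--         for j in range(i+1, len(points)):
--             if points[i][0] == points[j][0]:
--                 y_start = min(points[i][1], points[j][1])
--                 y_end = max(points[i][1], points[j][1])
--                 verticals.append((points[i][0], y_start, y_end))
--     return verticals
-- ===== SOURCE B (Python) =====
-- def getVerticalWalls(points):
--     cols = {}
--     for i, (x, y) in enumerate(points):
--         cols[x] = cols.get(x, []) + [(i, y)]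
--     verticals = []
--     for i, (x, y) in enumerate(points):
--         for j, yj in cols.get(x, []):
--             if j > i:
--                 verticals.append((x, min(y, yj), max(y, yj)))
--     return verticals
-- ===== Notes on version B (the rewrite author's own statement) =====
-- stated objective: alternative
-- what changed: B builds a dict mapping each x-coordinate to its ordered posting list of (index, y) in one pass, then for each point emits segments only from its own column's posting list (later indices), instead of A's nested all-pairs index scan.
import Mathlib
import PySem

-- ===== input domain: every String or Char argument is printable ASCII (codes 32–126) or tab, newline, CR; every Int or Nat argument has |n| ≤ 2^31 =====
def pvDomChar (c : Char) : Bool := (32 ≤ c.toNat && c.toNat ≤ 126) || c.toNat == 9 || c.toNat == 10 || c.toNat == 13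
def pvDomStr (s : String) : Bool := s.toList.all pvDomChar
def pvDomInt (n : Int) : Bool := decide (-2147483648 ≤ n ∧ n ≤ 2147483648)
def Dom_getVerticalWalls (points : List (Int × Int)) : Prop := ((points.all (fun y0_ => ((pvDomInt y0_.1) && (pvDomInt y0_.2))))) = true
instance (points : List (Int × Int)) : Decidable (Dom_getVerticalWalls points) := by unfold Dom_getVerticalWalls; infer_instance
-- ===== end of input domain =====

-- B groups the points by x-coordinate into a dict once, then emits each pair from its
-- column's posting list instead of testing every index pair (objective: alternative).

-- ===== PORT A =====
def getVerticalWalls (points : List (Int × Int)) : List (Int × Int × Int) :=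
  (PySem.List.pyRange 0 (points.length : Int) 1).foldl (fun verticals i =>
    (PySem.List.pyRange (i + 1) (points.length : Int) 1).foldl (fun verticals j =>
      if (PySem.List.pyGetD points i (0, 0)).1 == (PySem.List.pyGetD points j (0, 0)).1 then
        verticals ++ [((PySem.List.pyGetD points i (0, 0)).1,
          min (PySem.List.pyGetD points i (0, 0)).2 (PySem.List.pyGetD points j (0, 0)).2,
          max (PySem.List.pyGetD points i (0, 0)).2 (PySem.List.pyGetD points j (0, 0)).2)]
      else verticals) verticals) []

-- ===== PORT B =====
def getVerticalWalls_alt (points : List (Int × Int)) : List (Int × Int × Int) :=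
  let cols := (PySem.List.enumerate points 0).foldl
    (fun d p => d.modify p.2.1 [] (· ++ [(p.1, p.2.2)])) PySem.Dict.empty
  (PySem.List.enumerate points 0).foldl (fun verticals p =>
    (cols.getD p.2.1 []).foldl (fun verticals q =>
      if p.1 < q.1 then
        verticals ++ [(p.2.1, min p.2.2 q.2, max p.2.2 q.2)]
      else verticals) verticals) []

-- ===== PRECONDITION & SPEC =====
def Spec_getVerticalWalls (points : List (Int × Int)) (out : List (Int × Int × Int)) : Prop := out = getVerticalWalls_alt points
instance (points : List (Int × Int)) (out : List (Int × Int × Int)) : Decidable (Spec_getVerticalWalls points out) := by unfold Spec_getVerticalWalls; infer_instance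

-- ===== CLAIM (what is proved, stated in full; the proofs are below) =====
def Claim_equal_getVerticalWalls : Prop := ∀ (points : List (Int × Int)), Dom_getVerticalWalls points → Spec_getVerticalWalls points (getVerticalWalls points)

-- ===== LEMMAS AND PROOFS =====

-- B's grouping dict, read back at x, is the enumerated list filtered to column x.
theorem cols_getD (points : List (Int × Int)) (x : Int) :
    ((PySem.List.enumerate points 0).foldl
      (fun d p => d.modify p.2.1 [] (· ++ [(p.1, p.2.2)])) PySem.Dict.empty).getD x []
    = ((PySem.List.enumerate points 0).filter (fun p => p.2.1 == x)).map (fun p => (p.1, p.2.2)) := by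
  have h : (PySem.List.enumerate points 0).foldl
      (fun d p => d.modify p.2.1 [] (· ++ [(p.1, p.2.2)])) PySem.Dict.empty
      = ((PySem.List.enumerate points 0).map (fun p => (p.2.1, (p.1, p.2.2)))).foldl
        (fun d q => d.modify q.1 [] (· ++ [q.2])) PySem.Dict.empty := by
    rw [List.foldl_map]
  rw [h, PySem.Dict.getD_foldl_modify_append, PySem.Dict.getD_empty, List.nil_append,
    List.filter_map, List.map_map]
  rfl

-- the inner loop of A, for a fixed i, equals B's filtered posting-list pass mapped back
theorem per_i (points : List (Int × Int)) (i : Int)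
    (hi : 0 ≤ i ∧ i < (points.length : Int)) :
    ((PySem.List.pyRange (i + 1) (points.length : Int) 1).filter
        (fun x => decide (((PySem.List.pyGetD points i (0, 0)).1 == (PySem.List.pyGetD points x (0, 0)).1) = true))).map
      (fun x => ((PySem.List.pyGetD points i (0, 0)).1,
        min (PySem.List.pyGetD points i (0, 0)).2 (PySem.List.pyGetD points x (0, 0)).2,
        max (PySem.List.pyGetD points i (0, 0)).2 (PySem.List.pyGetD points x (0, 0)).2))
    = ((PySem.List.pyRange 0 (points.length : Int) 1).filter
        (fun a => decide (i < a) && (PySem.List.pyGetD points a (0, 0)).1 == (PySem.List.pyGetD points i (0, 0)).1)).map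
      (fun x => ((PySem.List.pyGetD points i (0, 0)).1,
        min (PySem.List.pyGetD points i (0, 0)).2 (PySem.List.pyGetD points x (0, 0)).2,
        max (PySem.List.pyGetD points i (0, 0)).2 (PySem.List.pyGetD points x (0, 0)).2)) := by
  have hsplit : PySem.List.pyRange 0 (points.length : Int) 1
      = PySem.List.pyRange 0 (i + 1) 1 ++ PySem.List.pyRange (i + 1) (points.length : Int) 1 :=
    PySem.List.pyRange_one_append 0 (i + 1) (points.length : Int) (by omega) (by omega)
  rw [hsplit, List.filter_append, List.map_append]
  have h1 : (PySem.List.pyRange 0 (i + 1) 1).filter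
      (fun a => decide (i < a) && (PySem.List.pyGetD points a (0, 0)).1 == (PySem.List.pyGetD points i (0, 0)).1) = [] := by
    rw [List.filter_eq_nil_iff]
    intro a ha
    rw [PySem.List.mem_pyRange_one] at ha
    simp only [Bool.and_eq_true, decide_eq_true_eq]
    rintro ⟨h, -⟩
    omega
  have h2 : (PySem.List.pyRange (i + 1) (points.length : Int) 1).filter
      (fun a => decide (i < a) && (PySem.List.pyGetD points a (0, 0)).1 == (PySem.List.pyGetD points i (0, 0)).1)
      = (PySem.List.pyRange (i + 1) (points.length : Int) 1).filter
        (fun x => decide (((PySem.List.pyGetD points i (0, 0)).1 == (PySem.List.pyGetD points x (0, 0)).1) = true)) := by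
    apply List.filter_congr
    intro a ha
    rw [PySem.List.mem_pyRange_one] at ha
    have hia : i < a := by omega
    by_cases hx : (PySem.List.pyGetD points i (0, 0)).1 = (PySem.List.pyGetD points a (0, 0)).1
    · simp [hia, hx]
    · simp [hia, beq_iff_eq, hx, Ne.symm hx]
  rw [h1, h2]
  simp

theorem main_eq (points : List (Int × Int)) :
    getVerticalWalls points = getVerticalWalls_alt points := by
  unfold getVerticalWalls getVerticalWalls_alt
  simp only [cols_getD]
  simp only [PySem.List.foldl_append_ite, PySem.List.foldl_append_eq_flatMap, List.nil_append]
  rw [PySem.List.enumerate_eq_map_pyRange points ((0 : Int), (0 : Int)), List.flatMap_map]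
  refine List.flatMap_congr (fun i hi => ?_)
  rw [PySem.List.mem_pyRange_one] at hi
  simp only [Function.comp, List.filter_map, List.map_map, List.filter_filter, PySem.List.len_eq]
  simp only [Function.comp_def]
  exact per_i points i hi

-- ===== VERDICT (by name: the statement is the Claim_ definition above) =====
theorem getVerticalWalls_spec : Claim_equal_getVerticalWalls := by
  intro points _
  unfold Spec_getVerticalWalls
  exact main_eq points
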